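-- pv_equiv track=rewrite | github.com/isavita/advent_generated | python/day23_part1_2022.py | calculate_empty_ground
-- ===== SOURCE A (Python) =====
-- def calculate_empty_ground(elves):
--     min_x = min(x for x, y in elves)
--     max_x = max(x for x, y in elves)
--     min_y = min(y for x, y in elves)
--     max_y = max(y for x, y in elves)
--
--     width = max_x - min_x + 1
--     height = max_y - min_y + 1
--     total_tiles = width * height
--     empty_tiles = total_tiles - len(elves)
--     return empty_tiles
-- ===== SOURCE B (Python) =====
-- def calculate_empty_ground(elves):
--     # sort-based: extrema read off the ends of the sorted coordinate lists
--     xs = sorted(x for x, y in elves)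
--     ys = sorted(y for x, y in elves)
--     return (xs[-1] - xs[0] + 1) * (ys[-1] - ys[0] + 1) - len(elves)
-- ===== Notes on version B (the rewrite author's own statement) =====
-- stated objective: alternative
-- what changed: Instead of four min/max scans, B sorts the x- and y-coordinate lists and reads the extrema off the first and last elements of each sorted list.
-- outside the precondition, e.g. on calculate_empty_ground(set()): A raises ValueError, B raises IndexError
import Mathlib
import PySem

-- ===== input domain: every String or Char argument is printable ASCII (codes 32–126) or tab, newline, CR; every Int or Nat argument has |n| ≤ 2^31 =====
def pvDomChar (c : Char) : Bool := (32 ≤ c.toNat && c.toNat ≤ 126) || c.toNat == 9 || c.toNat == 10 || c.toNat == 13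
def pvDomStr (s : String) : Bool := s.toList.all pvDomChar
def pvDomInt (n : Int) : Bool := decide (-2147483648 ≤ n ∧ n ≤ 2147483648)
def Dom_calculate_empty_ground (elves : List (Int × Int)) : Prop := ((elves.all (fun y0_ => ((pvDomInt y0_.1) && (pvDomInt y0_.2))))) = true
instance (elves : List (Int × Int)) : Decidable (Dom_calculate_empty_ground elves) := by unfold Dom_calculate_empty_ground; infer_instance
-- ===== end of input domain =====

-- B computes the extrema by sorting each coordinate list and taking its ends, instead of A's four min/max scans (objective: alternative algorithm).
-- ===== PORT A =====
def calculate_empty_ground (elves : List (Int × Int)) : Int :=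
  let min_x := (PySem.List.min? (elves.map (fun p => p.1)) (fun v => v)).getD 0
  let max_x := (PySem.List.max? (elves.map (fun p => p.1)) (fun v => v)).getD 0
  let min_y := (PySem.List.min? (elves.map (fun p => p.2)) (fun v => v)).getD 0
  let max_y := (PySem.List.max? (elves.map (fun p => p.2)) (fun v => v)).getD 0
  let width := max_x - min_x + 1
  let height := max_y - min_y + 1
  let total_tiles := width * height
  let empty_tiles := total_tiles - (elves.length : Int)
  empty_tiles

-- ===== PORT B =====
def calculate_empty_ground_alt (elves : List (Int × Int)) : Int :=
  let xs := PySem.List.sorted (elves.map (fun p => p.1)) (fun v => v)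
  let ys := PySem.List.sorted (elves.map (fun p => p.2)) (fun v => v)
  -- xs[-1], xs[0], ys[-1], ys[0]: Python raises IndexError on an empty list; unreachable under Pre_
  ((PySem.List.pyGet? xs (-1)).getD 0 - (PySem.List.pyGet? xs 0).getD 0 + 1) *
    ((PySem.List.pyGet? ys (-1)).getD 0 - (PySem.List.pyGet? ys 0).getD 0 + 1) -
    (elves.length : Int)

-- ===== PRECONDITION & SPEC =====
-- A raises ValueError (min() of an empty sequence) on []; Pre_ excludes exactly that input.
def Pre_calculate_empty_ground (elves : List (Int × Int)) : Prop := elves ≠ []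
instance (elves : List (Int × Int)) : Decidable (Pre_calculate_empty_ground elves) := by unfold Pre_calculate_empty_ground; infer_instance
def pvWitness_calculate_empty_ground : (List (Int × Int)) := [(0, 0)]
def Spec_calculate_empty_ground (elves : List (Int × Int)) (out : Int) : Prop := out = calculate_empty_ground_alt elves
instance (elves : List (Int × Int)) (out : Int) : Decidable (Spec_calculate_empty_ground elves out) := by unfold Spec_calculate_empty_ground; infer_instance

-- ===== CLAIM (what is proved, stated in full; the proofs are below) =====
def Claim_equal_calculate_empty_ground : Prop := ∀ (elves : List (Int × Int)), Dom_calculate_empty_ground elves → Pre_calculate_empty_ground elves → Spec_calculate_empty_ground elves (calculate_empty_ground elves)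

-- ===== LEMMAS AND PROOFS =====
-- every element of a (≤)-sorted list is ≤ its last element
theorem le_getLast_of_pairwise (l : List Int) (h : l.Pairwise (· ≤ ·)) :
    ∀ x ∈ l, ∀ m, l.getLast? = some m → x ≤ m := by
  induction l with
  | nil => intro x hx; simp at hx
  | cons a t ih =>
    intro x hx m hm
    rcases List.Pairwise.of_cons h with _
    cases t with
    | nil => simp at hm hx; omega
    | cons b u =>
      simp only [List.getLast?_cons_cons] at hm
      rcases List.mem_cons.1 hx with rfl | hx'
      · have hmem : m ∈ b :: u := by
          have := List.mem_of_getLast? (l := b :: u) hm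
          exact this
        exact (List.pairwise_cons.1 h).1 m hmem
      · exact ih h.of_cons x hx' m hm

-- the ends of sorted(l) are foldl min / foldl max of l = a :: t
theorem sorted_ends (a : Int) (t : List Int) :
    (PySem.List.sorted (a :: t) (fun v => v) false)[0]? = some (t.foldl min a) ∧
    (PySem.List.sorted (a :: t) (fun v => v) false).getLast? = some (t.foldl max a) := by
  set s := PySem.List.sorted (a :: t) (fun v => v) false with hs
  have hperm : s.Perm (a :: t) := PySem.List.sorted_perm _ _ _
  have hpw : s.Pairwise (· ≤ ·) := by
    simpa using PySem.List.sorted_pairwise (xs := a :: t) (key := fun v => v)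
  have hne : s ≠ [] := by
    intro h0
    have := hperm.length_eq; simp [h0] at this
  obtain ⟨m, u, hmu⟩ := List.exists_cons_of_ne_nil hne
  -- head
  have hmin_mem : t.foldl min a ∈ a :: t := by
    rcases PySem.List.foldl_min_mem t a with h | h
    · simp [h]
    · exact List.mem_cons_of_mem _ h
  have hmin_le : ∀ y ∈ a :: t, t.foldl min a ≤ y := by
    intro y hy
    rcases List.mem_cons.1 hy with rfl | hy'
    · exact (PySem.List.foldl_min_le t y).1
    · exact (PySem.List.foldl_min_le t a).2 y hy'
  have hmu' : PySem.List.sorted (a :: t) (fun v => v) false = m :: u := hs ▸ hmu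
  have hm_le : ∀ y ∈ a :: t, m ≤ y :=
    PySem.List.key_head_sorted_le (a :: t) (fun v => v) hmu'
  have hm_mem : m ∈ a :: t := hperm.mem_iff.1 (by simp [hmu])
  have hhead : m = t.foldl min a :=
    le_antisymm (hm_le _ hmin_mem) (hmin_le _ hm_mem)
  -- last
  obtain ⟨z, hz⟩ := List.getLast?_isSome.2 hne |> Option.isSome_iff_exists.1
  have hz_mem : z ∈ a :: t := hperm.mem_iff.1 (List.mem_of_getLast? hz)
  have hmax_mem : t.foldl max a ∈ a :: t := by
    rcases PySem.List.foldl_max_mem t a with h | h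
    · simp [h]
    · exact List.mem_cons_of_mem _ h
  have hmax_ge : ∀ y ∈ a :: t, y ≤ t.foldl max a := by
    intro y hy
    rcases List.mem_cons.1 hy with rfl | hy'
    · exact (PySem.List.le_foldl_max t y).1
    · exact (PySem.List.le_foldl_max t a).2 y hy'
  have hz_ge : ∀ y ∈ s, y ≤ z := fun y hy => le_getLast_of_pairwise s hpw y hy z hz
  have hlast : z = t.foldl max a :=
    le_antisymm (hmax_ge _ hz_mem)
      (hz_ge _ (hperm.mem_iff.2 hmax_mem))
  constructor
  · simp [hmu, hhead]
  · simp [hz, hlast]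

-- ===== VERDICT (by name: the statement is the Claim_ definition above) =====
theorem calculate_empty_ground_spec : Claim_equal_calculate_empty_ground := by
  intro elves _ hpre
  match elves with
  | [] => exact absurd rfl hpre
  | (x0, y0) :: rest =>
    show calculate_empty_ground _ = calculate_empty_ground_alt _
    have hx := sorted_ends x0 (rest.map (fun p => p.1))
    have hy := sorted_ends y0 (rest.map (fun p => p.2))
    simp only [calculate_empty_ground, calculate_empty_ground_alt, List.map_cons,
      PySem.List.min?_id_cons, PySem.List.max?_id_cons, Option.getD_some,
      PySem.List.pyGet?_neg_one, PySem.List.pyGet?_zero,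
      hx.1, hx.2, hy.1, hy.2]
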